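-- pv_equiv track=rewrite | github.com/aitomatic/openssa | examples/semiconductor/streamlit-main.py | parse_recipe_text
-- ===== SOURCE A (Python) =====
-- def parse_recipe_text(text: str) -> dict[str, str]:
--     # Initialize an empty dictionary to store the parsed data
--     parsed_data = {"recipe_1": "", "recipe_2": "", "agent_advice": ""}
--
--     # Split the text by lines
--     lines = text.split("\n")
--
--     # Initialize a variable to keep track of the current section
--     current_section = None
--
--     # Loop through each line
--     for line in lines:
--         # Check if the line indicates the start of a new section
--         if "recipe_1:" in line:
--             current_section = "recipe_1"
--         elif "recipe_2:" in line:
--             current_section = "recipe_2"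
--         elif "agent_advice:" in line:
--             current_section = "agent_advice"
--         elif current_section:
--             # If we are in a section, append the line to the corresponding key in the dictionary
--             parsed_data[current_section] += line + "\n"
--
--     # Remove any trailing newlines from the values
--     parsed_data = {key: value.strip() for key, value in parsed_data.items()}
--
--     return parsed_data
-- ===== SOURCE B (Python) =====
-- def _classify(line):
--     if "recipe_1:" in line:
--         return "recipe_1"
--     if "recipe_2:" in line:
--         return "recipe_2"
--     if "agent_advice:" in line:
--         return "agent_advice"
--     return None
--
--
-- def parse_recipe_text(text: str) -> dict[str, str]:
--     # Chunk the lines: each marker line opens a chunk holding the lines up to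
--     # the next marker; lines before the first marker belong to no chunk.
--     lines = text.split("\n")
--     chunks = []
--     i, n = 0, len(lines)
--     while i < n:
--         sec = _classify(lines[i])
--         i += 1
--         if sec is None:
--             continue
--         start = i
--         while i < n and _classify(lines[i]) is None:
--             i += 1
--         chunks.append((sec, lines[start:i]))
--     return {
--         key: "\n".join(ln for sec, chunk in chunks if sec == key for ln in chunk).strip()
--         for key in ("recipe_1", "recipe_2", "agent_advice")
--     }
-- ===== Notes on version B (the rewrite author's own statement) =====
-- stated objective: alternative
-- what changed: A is a line-by-line state machine carrying the current section and appending into a dict inside the loop; B first chunks the lines into (section, lines-until-next-marker) pairs in one scanning pass and then builds each key's value by joining its chunks' lines with newline, stripping once.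
import Mathlib
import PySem

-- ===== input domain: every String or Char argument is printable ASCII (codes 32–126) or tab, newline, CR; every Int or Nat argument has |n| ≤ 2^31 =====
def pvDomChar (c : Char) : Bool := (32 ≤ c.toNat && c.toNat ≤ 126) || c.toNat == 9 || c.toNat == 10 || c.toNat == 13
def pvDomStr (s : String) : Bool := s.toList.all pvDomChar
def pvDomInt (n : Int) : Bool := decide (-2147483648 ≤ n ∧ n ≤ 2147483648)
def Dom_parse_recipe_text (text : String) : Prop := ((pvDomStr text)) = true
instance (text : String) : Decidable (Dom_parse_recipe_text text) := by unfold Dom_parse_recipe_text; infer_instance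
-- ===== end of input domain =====

-- B replaces A's line-by-line current-section state machine by a marker-chunking pass
-- followed by a per-key join of the chunks (objective: alternative decomposition, same cost).

-- ===== PORT A =====
-- loop body of A's for-loop, named so the fold can cite it
def pvStepA (st : PySem.Dict String String × Option String) (line : String) :
    PySem.Dict String String × Option String :=
  if PySem.Str.isIn "recipe_1:" line then (st.1, some "recipe_1")
  else if PySem.Str.isIn "recipe_2:" line then (st.1, some "recipe_2")
  else if PySem.Str.isIn "agent_advice:" line then (st.1, some "agent_advice")
  else
    match st.2 with
    | some s => (st.1.modify s "" (fun v => v ++ line ++ "\n"), st.2)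
    | none => st

def parse_recipe_text (text : String) : List (String × String) :=
  let parsed0 : PySem.Dict String String :=
    ((PySem.Dict.empty.insert "recipe_1" "").insert "recipe_2" "").insert "agent_advice" ""
  -- text.split("\n"): the separator is the nonempty literal "\n", so split? is `some`
  let lines : List String := (PySem.Str.split? text "\n").getD []
  let st := lines.foldl pvStepA (parsed0, none)
  st.1.items.map (fun kv => (kv.1, PySem.Str.strip kv.2))

-- ===== PORT B =====
def pvClassify (line : String) : Option String :=
  if PySem.Str.isIn "recipe_1:" line then some "recipe_1"
  else if PySem.Str.isIn "recipe_2:" line then some "recipe_2"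
  else if PySem.Str.isIn "agent_advice:" line then some "agent_advice"
  else none

-- the chunking while-loop of B: marker line → (section, lines up to the next marker)
def pvChunks : List String → List (String × List String)
  | [] => []
  | l :: ls =>
    match pvClassify l with
    | none => pvChunks ls
    | some s =>
        (s, ls.takeWhile (fun x => (pvClassify x).isNone)) ::
          pvChunks (ls.dropWhile (fun x => (pvClassify x).isNone))
termination_by ls => ls.length
decreasing_by
  · simp
  · exact Nat.lt_succ_of_le (List.length_dropWhile_le _ _)

def parse_recipe_text_alt (text : String) : List (String × String) :=
  let chunks := pvChunks ((PySem.Str.split? text "\n").getD [])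
  ["recipe_1", "recipe_2", "agent_advice"].map (fun key =>
    (key, PySem.Str.strip (PySem.Str.join "\n"
      ((chunks.filter (fun c => c.1 == key)).flatMap (fun c => c.2)))))

-- ===== PRECONDITION & SPEC =====
def Spec_parse_recipe_text (text : String) (out : List (String × String)) : Prop := out = parse_recipe_text_alt text
instance (text : String) (out : List (String × String)) : Decidable (Spec_parse_recipe_text text out) := by unfold Spec_parse_recipe_text; infer_instance

-- ===== CLAIM (what is proved, stated in full; the proofs are below) =====
def Claim_equal_parse_recipe_text : Prop := ∀ (text : String), Dom_parse_recipe_text text → Spec_parse_recipe_text text (parse_recipe_text text)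

-- ===== LEMMAS AND PROOFS =====

-- text appended to key k by A's loop, as a recursion over the lines
def pvAddA (k : String) : Option String → List String → String
  | _, [] => ""
  | cur, l :: ls =>
    match pvClassify l with
    | some s => pvAddA k (some s) ls
    | none =>
        match cur with
        | some s => (if s == k then l ++ "\n" else "") ++ pvAddA k (some s) ls
        | none => pvAddA k none ls

def pvMk3 (a b c : String) : PySem.Dict String String :=
  PySem.Dict.mk [("recipe_1", a), ("recipe_2", b), ("agent_advice", c)]

def pvCatNL (L : List String) : String := L.foldr (fun l acc => l ++ "\n" ++ acc) ""

def pvCollected (k : String) (ls : List String) : List String :=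
  ((pvChunks ls).filter (fun c => c.1 == k)).flatMap (fun c => c.2)

lemma pvModify_mk3_r1 (a b c : String) (f : String → String) :
    (pvMk3 a b c).modify "recipe_1" "" f = pvMk3 (f a) b c := by
  simp [pvMk3, PySem.Dict.modify, PySem.Dict.insert, PySem.Dict.contains,
    PySem.Dict.getD, PySem.Dict.get?]

lemma pvModify_mk3_r2 (a b c : String) (f : String → String) :
    (pvMk3 a b c).modify "recipe_2" "" f = pvMk3 a (f b) c := by
  simp [pvMk3, PySem.Dict.modify, PySem.Dict.insert, PySem.Dict.contains,
    PySem.Dict.getD, PySem.Dict.get?]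

lemma pvModify_mk3_aa (a b c : String) (f : String → String) :
    (pvMk3 a b c).modify "agent_advice" "" f = pvMk3 a b (f c) := by
  simp [pvMk3, PySem.Dict.modify, PySem.Dict.insert, PySem.Dict.contains,
    PySem.Dict.getD, PySem.Dict.get?]

-- A's fold, characterised by pvAddA
lemma pvStepA_classify (st : PySem.Dict String String × Option String) (line : String) :
    pvStepA st line =
      match pvClassify line with
      | some s => (st.1, some s)
      | none =>
          match st.2 with
          | some s => (st.1.modify s "" (fun v => v ++ line ++ "\n"), st.2)
          | none => st := by
  simp only [pvStepA, pvClassify]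
  split_ifs <;> rfl

lemma pvClassify_mem (line s : String) (h : pvClassify line = some s) :
    s = "recipe_1" ∨ s = "recipe_2" ∨ s = "agent_advice" := by
  simp only [pvClassify] at h
  split_ifs at h <;> simp_all

lemma pvFoldA (ls : List String) :
    ∀ (a b c : String) (cur : Option String),
      cur = none ∨ cur = some "recipe_1" ∨ cur = some "recipe_2" ∨ cur = some "agent_advice" →
      (ls.foldl pvStepA (pvMk3 a b c, cur)).1 =
        pvMk3 (a ++ pvAddA "recipe_1" cur ls) (b ++ pvAddA "recipe_2" cur ls)
          (c ++ pvAddA "agent_advice" cur ls) := by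
  induction ls with
  | nil => intro a b c cur _; simp [pvAddA]
  | cons line ls ih =>
    intro a b c cur hcur
    rw [List.foldl_cons, pvStepA_classify]
    cases h : pvClassify line with
    | some s =>
      have hmem := pvClassify_mem line s h
      rw [show pvAddA "recipe_1" cur (line :: ls) = pvAddA "recipe_1" (some s) ls by
        cases cur <;> simp [pvAddA, h]]
      rw [show pvAddA "recipe_2" cur (line :: ls) = pvAddA "recipe_2" (some s) ls by
        cases cur <;> simp [pvAddA, h]]
      rw [show pvAddA "agent_advice" cur (line :: ls) = pvAddA "agent_advice" (some s) ls by
        cases cur <;> simp [pvAddA, h]]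
      exact ih a b c (some s) (by tauto)
    | none =>
      have haddA : ∀ k s', pvAddA k (some s') (line :: ls) =
          (if s' == k then line ++ "\n" else "") ++ pvAddA k (some s') ls := by
        intro k s'; simp [pvAddA, h]
      rcases hcur with rfl | rfl | rfl | rfl
      · rw [show pvAddA "recipe_1" none (line :: ls) = pvAddA "recipe_1" none ls by
          simp [pvAddA, h]]
        rw [show pvAddA "recipe_2" none (line :: ls) = pvAddA "recipe_2" none ls by
          simp [pvAddA, h]]
        rw [show pvAddA "agent_advice" none (line :: ls) = pvAddA "agent_advice" none ls by
          simp [pvAddA, h]]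
        exact ih a b c none (by tauto)
      · show (ls.foldl pvStepA ((pvMk3 a b c).modify "recipe_1" "" _, some "recipe_1")).1 = _
        rw [pvModify_mk3_r1, ih _ _ _ (some "recipe_1") (by tauto)]
        simp [haddA, String.append_assoc]
      · show (ls.foldl pvStepA ((pvMk3 a b c).modify "recipe_2" "" _, some "recipe_2")).1 = _
        rw [pvModify_mk3_r2, ih _ _ _ (some "recipe_2") (by tauto)]
        simp [haddA, String.append_assoc]
      · show (ls.foldl pvStepA ((pvMk3 a b c).modify "agent_advice" "" _, some "agent_advice")).1 = _
        rw [pvModify_mk3_aa, ih _ _ _ (some "agent_advice") (by tauto)]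
        simp [haddA, String.append_assoc]

lemma pvCatNL_cons (l : String) (ls : List String) :
    pvCatNL (l :: ls) = l ++ "\n" ++ pvCatNL ls := rfl

lemma pvCatNL_foldr (x : List String) (acc : String) :
    x.foldr (fun l acc => l ++ "\n" ++ acc) acc = pvCatNL x ++ acc := by
  induction x with
  | nil => simp [pvCatNL]
  | cons l x ih => rw [List.foldr_cons, ih]; simp [pvCatNL_cons, String.append_assoc]

lemma pvCatNL_append (x y : List String) :
    pvCatNL (x ++ y) = pvCatNL x ++ pvCatNL y := by
  show (x ++ y).foldr (fun l acc => l ++ "\n" ++ acc) "" = pvCatNL x ++ pvCatNL y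
  rw [List.foldr_append, pvCatNL_foldr]; rfl

lemma pvCollected_cons_none (k l : String) (ls : List String)
    (h : pvClassify l = none) : pvCollected k (l :: ls) = pvCollected k ls := by
  simp [pvCollected, pvChunks, h]

lemma pvCollected_cons_some (k l s : String) (ls : List String)
    (h : pvClassify l = some s) :
    pvCollected k (l :: ls) =
      (if s == k then ls.takeWhile (fun x => (pvClassify x).isNone) else []) ++
        pvCollected k (ls.dropWhile (fun x => (pvClassify x).isNone)) := by
  simp only [pvCollected, pvChunks, h, List.filter_cons]
  by_cases hk : s = k
  · simp [hk]
  · simp [(by simpa using hk : (s == k) = false)]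

lemma pvAddA_some (ls : List String) :
    ∀ (s k : String),
      pvAddA k (some s) ls =
        pvCatNL ((if s == k then ls.takeWhile (fun x => (pvClassify x).isNone) else []) ++
          pvCollected k (ls.dropWhile (fun x => (pvClassify x).isNone))) := by
  induction ls with
  | nil =>
    intro s k
    simp [pvAddA, pvCollected, pvChunks, pvCatNL]
  | cons l ls ih =>
    intro s k
    cases h : pvClassify l with
    | some s' =>
      rw [show pvAddA k (some s) (l :: ls) = pvAddA k (some s') ls by
            simp [pvAddA, h]]
      rw [ih s' k]
      rw [show (l :: ls).takeWhile (fun x => (pvClassify x).isNone) = [] by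
            simp [h]]
      rw [show (l :: ls).dropWhile (fun x => (pvClassify x).isNone) = l :: ls by
            simp [h]]
      rw [pvCollected_cons_some k l s' ls h]
      simp [pvCatNL]
    | none =>
      rw [show pvAddA k (some s) (l :: ls) =
            (if s == k then l ++ "\n" else "") ++ pvAddA k (some s) ls by
            simp [pvAddA, h]]
      rw [ih s k]
      rw [show (l :: ls).takeWhile (fun x => (pvClassify x).isNone) =
            l :: ls.takeWhile (fun x => (pvClassify x).isNone) by
            simp [h]]
      rw [show (l :: ls).dropWhile (fun x => (pvClassify x).isNone) =
            ls.dropWhile (fun x => (pvClassify x).isNone) by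
            simp [h]]
      by_cases hk : (s == k) = true
      · simp only [hk, if_pos]
        rw [pvCatNL_append, pvCatNL_append]
        simp [pvCatNL, String.append_assoc]
      · simp only [Bool.not_eq_true] at hk
        simp [hk]

lemma pvAddA_none (ls : List String) (k : String) :
    pvAddA k none ls = pvCatNL (pvCollected k ls) := by
  induction ls with
  | nil => simp [pvAddA, pvCollected, pvChunks, pvCatNL]
  | cons l ls ih =>
    cases h : pvClassify l with
    | none =>
      rw [show pvAddA k none (l :: ls) = pvAddA k none ls by simp [pvAddA, h]]
      rw [ih, pvCollected_cons_none k l ls h]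
    | some s =>
      rw [show pvAddA k none (l :: ls) = pvAddA k (some s) ls by simp [pvAddA, h]]
      rw [pvAddA_some, pvCollected_cons_some k l s ls h]

lemma pvRstrip_append_nl (z : List Char) :
    PySem.Chars.rstrip (z ++ ['\n']) = PySem.Chars.rstrip z := by
  simp [PySem.Chars.rstrip, PySem.Chars.isspace]

lemma pvStrip_append_nl (z : List Char) :
    PySem.Chars.strip (z ++ ['\n']) = PySem.Chars.strip z := by
  simp only [PySem.Chars.strip, PySem.Chars.lstrip, List.dropWhile_append]
  split
  · next he =>
    simp only [List.isEmpty_iff] at he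
    rw [he]
    simp [PySem.Chars.isspace, PySem.Chars.rstrip]
  · exact pvRstrip_append_nl _

lemma pvCatNL_toList (L : List String) :
    (pvCatNL L).toList =
      PySem.Chars.join ['\n'] (L.map String.toList) ++ (if L = [] then [] else ['\n']) := by
  induction L with
  | nil => simp [pvCatNL, PySem.Chars.join_nil]
  | cons l L ih =>
    rw [pvCatNL_cons]
    cases L with
    | nil => simp [pvCatNL, PySem.Chars.join_singleton]
    | cons m M =>
      simp only [List.map_cons, PySem.Chars.join_cons_cons]
      simp only [List.map_cons] at ih
      simp [ih, String.append_assoc]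

lemma pvStrip_catNL (L : List String) :
    PySem.Str.strip (pvCatNL L) = PySem.Str.strip (PySem.Str.join "\n" L) := by
  simp only [PySem.Str.strip]
  congr 1
  have hj : (PySem.Str.join "\n" L).toList = PySem.Chars.join ['\n'] (L.map String.toList) := by
    simp [PySem.Str.join]
  rw [hj, pvCatNL_toList]
  rcases eq_or_ne L [] with h | h
  · simp [h]
  · rw [if_neg h, pvStrip_append_nl]

-- ===== VERDICT (by name: the statement is the Claim_ definition above) =====
theorem parse_recipe_text_spec : Claim_equal_parse_recipe_text := by
  intro text _
  show parse_recipe_text text = parse_recipe_text_alt text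
  simp only [parse_recipe_text, parse_recipe_text_alt]
  rw [show ((PySem.Dict.empty.insert "recipe_1" "").insert "recipe_2" "").insert
        "agent_advice" "" = pvMk3 "" "" "" from rfl]
  rw [pvFoldA _ "" "" "" none (Or.inl rfl)]
  simp only [pvMk3, List.map_cons, List.map_nil, String.empty_append]
  simp [pvAddA_none, pvStrip_catNL, pvCollected]
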